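-- pv_equiv track=rewrite | github.com/zhhu1996/Code-for-Review | 2568.py | minImpossibleOR
-- ===== SOURCE A (Python) =====
-- from typing import List
--
-- def minImpossibleOR(nums: List[int]) -> int:
--     """最小无法得到的或值
--     1. 位运算
--     从小到大枚举2^i是否出现过, 第一个没出现的就是答案
--     """
--     e = set(nums)
--     i = 0
--     while True:
--         num = 2 ** i
--         if num not in e:
--             return num
--         i += 1
-- ===== SOURCE B (Python) =====
-- from typing import List
--
-- def minImpossibleOR(nums: List[int]) -> int:
--     # One pass: OR together every power-of-two value present into a bitmask,
--     # then the answer is the lowest zero bit of the mask, computed arithmetically.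
--     mask = 0
--     for v in nums:
--         if v > 0 and v & (v - 1) == 0:
--             mask |= v
--     x = mask + 1
--     return x - (x & (x - 1))
-- ===== Notes on version B (the rewrite author's own statement) =====
-- stated objective: alternative
-- what changed: Replaces the unbounded while-loop probing successive powers of two against a hash set by a single pass that ORs every power-of-two element into a bitmask and then extracts the lowest zero bit arithmetically (x - (x & (x-1)) on x = mask+1); no set is built.
import Mathlib
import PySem

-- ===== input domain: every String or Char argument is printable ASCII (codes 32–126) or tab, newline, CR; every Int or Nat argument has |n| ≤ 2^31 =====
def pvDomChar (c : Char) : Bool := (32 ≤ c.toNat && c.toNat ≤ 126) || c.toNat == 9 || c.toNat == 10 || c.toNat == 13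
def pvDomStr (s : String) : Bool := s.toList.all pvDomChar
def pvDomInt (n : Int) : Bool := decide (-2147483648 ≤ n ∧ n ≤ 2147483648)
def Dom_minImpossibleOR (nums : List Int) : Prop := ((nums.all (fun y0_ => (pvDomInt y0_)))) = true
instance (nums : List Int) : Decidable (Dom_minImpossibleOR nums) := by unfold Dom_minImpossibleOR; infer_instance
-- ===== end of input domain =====

-- B replaces A's while-loop probing of successive powers of two against a set by one
-- bitmask pass plus a lowest-zero-bit computation (alternative decomposition, not claimed faster).

-- ===== PORT A =====
-- A's 'while True' loop, fueled: fuel = nums.length + 1 always suffices (the first missing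
-- power of two has exponent ≤ nums.length, proved below in minImpossibleOR_loop_exits), so the
-- fuel-exhausted branch (returning 0) is never reached.
def minImpossibleORLoop (e : PySem.Set Int) : Nat → Nat → Int
  | 0, _ => 0
  | fuel + 1, i =>
      let num : Int := 2 ^ i
      if !(PySem.Set.contains e num) then num
      else minImpossibleORLoop e fuel (i + 1)

def minImpossibleOR (nums : List Int) : Int :=
  let e : PySem.Set Int := PySem.Set.ofList nums
  minImpossibleORLoop e (nums.length + 1) 0

-- ===== PORT B =====
-- Python B's mask is a nonnegative int built from values checked 'v > 0', so representing it
-- as Nat and using v.toNat is exact.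
def minImpossibleOR_alt (nums : List Int) : Int :=
  let mask : Nat := nums.foldl
    (fun m v => if 0 < v ∧ v.toNat &&& (v.toNat - 1) = 0 then m ||| v.toNat else m) 0
  let x := mask + 1
  ((x - (x &&& (x - 1)) : Nat) : Int)

-- ===== PRECONDITION & SPEC =====
def Spec_minImpossibleOR (nums : List Int) (out : Int) : Prop := out = minImpossibleOR_alt nums
instance (nums : List Int) (out : Int) : Decidable (Spec_minImpossibleOR nums out) := by unfold Spec_minImpossibleOR; infer_instance

-- ===== CLAIM (what is proved, stated in full; the proofs are below) =====
def Claim_equal_minImpossibleOR : Prop := ∀ (nums : List Int), Dom_minImpossibleOR nums → Spec_minImpossibleOR nums (minImpossibleOR nums)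

-- ===== LEMMAS AND PROOFS =====

-- lowest zero bit, by halving (proof-side helper only)
def lzb (m : Nat) : Nat :=
  if h : m % 2 = 0 then 0 else lzb (m / 2) + 1
  decreasing_by exact Nat.div_lt_self (by omega) (by omega)

theorem lzb_even {m : Nat} (h : m % 2 = 0) : lzb m = 0 := by rw [lzb]; simp [h]

theorem lzb_odd {m : Nat} (h : m % 2 = 1) : lzb m = lzb (m / 2) + 1 := by
  rw [lzb]; simp [h]

theorem lzb_testBit_self (m : Nat) : m.testBit (lzb m) = false := by
  induction m using Nat.strong_induction_on with
  | _ m ih =>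
    rcases Nat.mod_two_eq_zero_or_one m with h | h
    · rw [lzb_even h, Nat.testBit_zero]; simp; omega
    · rw [lzb_odd h, Nat.testBit_succ]
      exact ih (m / 2) (Nat.div_lt_self (by omega) (by omega))

theorem lzb_testBit_lt (m : Nat) : ∀ j < lzb m, m.testBit j = true := by
  induction m using Nat.strong_induction_on with
  | _ m ih =>
    intro j hj
    rcases Nat.mod_two_eq_zero_or_one m with h | h
    · rw [lzb_even h] at hj; omega
    · rw [lzb_odd h] at hj
      cases j with
      | zero => rw [Nat.testBit_zero]; simp [h]
      | succ j =>
        rw [Nat.testBit_succ]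
        exact ih (m / 2) (Nat.div_lt_self (by omega) (by omega)) j (by omega)

-- the arithmetic lowest-zero-bit formula
theorem lzb_formula (m : Nat) : (m + 1) - ((m + 1) &&& m) = 2 ^ lzb m := by
  induction m using Nat.strong_induction_on with
  | _ m ih =>
    rcases Nat.mod_two_eq_zero_or_one m with h | h
    · -- m even: (m+1) &&& m = m
      have hand : (m + 1) &&& m = m := by
        apply Nat.eq_of_testBit_eq
        intro j
        cases j with
        | zero => simp [Nat.testBit_zero]; omega
        | succ j =>
          rw [Nat.testBit_and, Nat.testBit_succ, Nat.testBit_succ]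
          have h1 : (m + 1) / 2 = m / 2 := by omega
          rw [h1, Bool.and_self]
      rw [hand, lzb_even h]; omega
    · -- m odd: m = 2k+1, reduce to k
      set k := m / 2 with hk
      have hm : m = 2 * k + 1 := by omega
      have hand : (m + 1) &&& m = 2 * ((k + 1) &&& k) := by
        apply Nat.eq_of_testBit_eq
        intro j
        cases j with
        | zero =>
          simp [Nat.testBit_zero]; omega
        | succ j =>
          rw [Nat.testBit_and, Nat.testBit_succ, Nat.testBit_succ]
          have h1 : (m + 1) / 2 = k + 1 := by omega
          have h2 : 2 * ((k + 1) &&& k) / 2 = (k + 1) &&& k := by omega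
          rw [h1, Nat.testBit_succ, h2, ← hk, Nat.testBit_and]
      have hle : (k + 1) &&& k ≤ k + 1 := Nat.and_le_left
      have ihk := ih k (by omega)
      have hm1 : m + 1 = 2 * (k + 1) := by omega
      rw [hand, lzb_odd h, hm1, ← Nat.mul_sub, ihk, pow_succ, Nat.mul_comm]

-- a positive value with v &&& (v-1) = 0 is a power of two
theorem pow2_of_and_pred_zero (n : Nat) (h0 : 0 < n) (h : n &&& (n - 1) = 0) :
    ∃ k, n = 2 ^ k := by
  induction n using Nat.strong_induction_on with
  | _ n ih =>
    have hb : ∀ j, (n.testBit j && (n - 1).testBit j) = false := by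
      intro j
      have hcg : (n &&& (n - 1)).testBit j = Nat.testBit 0 j := congrArg (fun x => x.testBit j) h
      rwa [Nat.testBit_and, Nat.zero_testBit] at hcg
    rcases Nat.lt_or_ge n 2 with h2 | h2
    · exact ⟨0, by omega⟩
    · rcases Nat.mod_two_eq_zero_or_one n with he | ho
      · -- n even: recurse on n / 2
        have hhalf : n / 2 &&& (n / 2 - 1) = 0 := by
          apply Nat.eq_of_testBit_eq
          intro j
          have := hb (j + 1)
          rw [Nat.testBit_succ, Nat.testBit_succ] at this
          have hd : (n - 1) / 2 = n / 2 - 1 := by omega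
          rw [hd] at this
          rw [Nat.testBit_and, Nat.zero_testBit]
          exact this
        obtain ⟨k, hk⟩ := ih (n / 2) (by omega) (by omega) hhalf
        exact ⟨k + 1, by rw [pow_succ]; omega⟩
      · -- n odd and n ≥ 2: contradiction, the high bits of n and n-1 coincide
        exfalso
        have hhalf : n / 2 = 0 := by
          apply Nat.eq_of_testBit_eq
          intro j
          have := hb (j + 1)
          rw [Nat.testBit_succ, Nat.testBit_succ] at this
          have hd : (n - 1) / 2 = n / 2 := by omega
          rw [hd, Bool.and_self] at this
          rw [Nat.zero_testBit]
          exact this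
        omega

-- every power of two satisfies the test
theorem pow2_and_pred_zero (k : Nat) : (2 ^ k) &&& (2 ^ k - 1) = 0 := by
  apply Nat.eq_of_testBit_eq
  intro j
  rw [Nat.testBit_and, Nat.zero_testBit, Nat.testBit_two_pow, Nat.testBit_two_pow_sub_one]
  by_cases hkj : k = j
  · subst hkj; simp
  · simp [hkj]

-- (2 : Int)^i = (2 : Int)^k iff i = k (through Nat)
theorem int_two_pow_inj {i k : Nat} (h : (2 : Int) ^ i = (2 : Int) ^ k) : i = k := by
  have : ((2 ^ i : Nat) : Int) = ((2 ^ k : Nat) : Int) := by push_cast; exact h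
  exact Nat.pow_right_injective (le_refl 2) (Int.natCast_inj.mp this)

-- bits of B's mask record exactly which powers of two occur
theorem mask_testBit (nums : List Int) : ∀ (acc : Nat) (i : Nat),
    (nums.foldl (fun m v => if 0 < v ∧ v.toNat &&& (v.toNat - 1) = 0 then m ||| v.toNat else m) acc).testBit i
      = (acc.testBit i || decide ((2 : Int) ^ i ∈ nums)) := by
  induction nums with
  | nil => intro acc i; simp
  | cons v rest ih =>
    intro acc i
    rw [List.foldl_cons, ih]
    by_cases hc : 0 < v ∧ v.toNat &&& (v.toNat - 1) = 0
    · obtain ⟨k, hk⟩ := pow2_of_and_pred_zero v.toNat (by omega) hc.2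
      have hv : v = (2 : Int) ^ k := by
        have := Int.toNat_of_nonneg (le_of_lt hc.1)
        rw [← this, hk]; push_cast; ring
      have hmem : ((2 : Int) ^ i ∈ v :: rest) ↔ (k = i ∨ (2 : Int) ^ i ∈ rest) := by
        rw [List.mem_cons, hv]
        constructor
        · rintro (h | h)
          · exact Or.inl (int_two_pow_inj h.symm)
          · exact Or.inr h
        · rintro (h | h)
          · exact Or.inl (by rw [h])
          · exact Or.inr h
      have hstep : (if 0 < v ∧ v.toNat &&& (v.toNat - 1) = 0 then acc ||| v.toNat else acc)
          = acc ||| v.toNat := if_pos hc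
      rw [hstep, Nat.testBit_or, hk, Nat.testBit_two_pow]
      have hdm : (decide ((2 : Int) ^ i ∈ v :: rest)) = (decide (k = i) || decide ((2 : Int) ^ i ∈ rest)) := by
        simp [hmem]
      rw [hdm, Bool.or_assoc]
    · have hnv : (2 : Int) ^ i ≠ v := by
        intro hvv
        apply hc
        constructor
        · rw [← hvv]; positivity
        · have : v.toNat = 2 ^ i := by
            have h2 : (0:Int) ≤ v := by rw [← hvv]; positivity
            have := Int.toNat_of_nonneg h2
            have hcast : ((v.toNat : Int)) = ((2 ^ i : Nat) : Int) := by
              rw [this, ← hvv]; push_cast; ring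
            exact Int.natCast_inj.mp hcast
          rw [this]; exact pow2_and_pred_zero i
      have hstep : (if 0 < v ∧ v.toNat &&& (v.toNat - 1) = 0 then acc ||| v.toNat else acc)
          = acc := if_neg hc
      rw [hstep]
      simp [List.mem_cons, hnv]

-- a missing power of two exists with exponent ≤ nums.length (pigeonhole)
theorem exists_missing (nums : List Int) :
    ∃ i, i ≤ nums.length ∧ (2 : Int) ^ i ∉ nums := by
  by_contra hcon
  push_neg at hcon
  set n := nums.length with hn
  have hinj : Function.Injective (fun i : Nat => (2 : Int) ^ i) := fun i j h => int_two_pow_inj h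
  have hnd : ((List.range (n + 1)).map (fun i : Nat => (2 : Int) ^ i)).Nodup :=
    (List.nodup_range).map hinj
  have hsub : ((List.range (n + 1)).map (fun i : Nat => (2 : Int) ^ i)).toFinset ⊆ nums.toFinset := by
    intro x hx
    rw [List.mem_toFinset, List.mem_map] at hx
    obtain ⟨i, hi, rfl⟩ := hx
    rw [List.mem_toFinset]
    exact hcon i (by simpa using Nat.lt_succ_iff.mp (List.mem_range.mp hi))
  have h1 : ((List.range (n + 1)).map (fun i : Nat => (2 : Int) ^ i)).toFinset.card = n + 1 := by
    rw [List.toFinset_card_of_nodup hnd]; simp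
  have h2 : nums.toFinset.card ≤ n := hn ▸ nums.toFinset_card_le
  have := Finset.card_le_card hsub
  omega

-- A's fueled loop returns 2^j for the least missing exponent j, given enough fuel
theorem loop_eq (nums : List Int) (j : Nat)
    (hnot : (2 : Int) ^ j ∉ nums) (hmem : ∀ k, k < j → (2 : Int) ^ k ∈ nums) :
    ∀ (fuel i : Nat), i ≤ j → j < i + fuel →
      minImpossibleORLoop (PySem.Set.ofList nums) fuel i = 2 ^ j := by
  have hcont : ∀ x : Int, PySem.Set.contains (PySem.Set.ofList nums) x = decide (x ∈ nums) := by
    intro x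
    by_cases hx : x ∈ nums
    · have : PySem.Set.contains (PySem.Set.ofList nums) x = true :=
        (PySem.Set.contains_iff _ _).mpr ((PySem.Set.mem_ofList _ _).mpr hx)
      simp [hx]
    · have : PySem.Set.contains (PySem.Set.ofList nums) x = false := by
        rw [Bool.eq_false_iff]
        intro hcc
        exact hx ((PySem.Set.mem_ofList _ _).mp ((PySem.Set.contains_iff _ _).mp hcc))
      simp [hx]
  intro fuel
  induction fuel with
  | zero => intro i h1 h2; omega
  | succ fuel ih =>
    intro i h1 h2
    rw [minImpossibleORLoop]
    by_cases hij : i = j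
    · subst hij
      simp [hnot]
    · have hlt : i < j := by omega
      have hm := hmem i hlt
      simp only [hcont, hm, decide_true, Bool.not_true, Bool.false_eq_true, if_false]
      exact ih (i + 1) (by omega) (by omega)

-- ===== VERDICT (by name: the statement is the Claim_ definition above) =====
theorem minImpossibleOR_spec : Claim_equal_minImpossibleOR := by
  intro nums _
  unfold Spec_minImpossibleOR minImpossibleOR minImpossibleOR_alt
  obtain ⟨i1, hi1le, hi1not⟩ := exists_missing nums
  have ex : ∃ i, (2 : Int) ^ i ∉ nums := ⟨i1, hi1not⟩
  set i0 := Nat.find ex with hi0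
  have hi0not : (2 : Int) ^ i0 ∉ nums := Nat.find_spec ex
  have hi0min : ∀ k, k < i0 → (2 : Int) ^ k ∈ nums := by
    intro k hk
    by_contra hcm
    have h : Nat.find ex ≤ k := Nat.find_le hcm
    rw [hi0] at hk
    omega
  have hfind1 : i0 ≤ i1 := Nat.find_le hi1not
  have hi0le : i0 ≤ nums.length := le_trans hfind1 hi1le
  -- A side
  have hA : minImpossibleORLoop (PySem.Set.ofList nums) (nums.length + 1) 0 = 2 ^ i0 :=
    loop_eq nums i0 hi0not hi0min (nums.length + 1) 0 (by omega) (by omega)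
  -- B side
  set mask := nums.foldl
    (fun m v => if 0 < v ∧ v.toNat &&& (v.toNat - 1) = 0 then m ||| v.toNat else m) 0 with hmask
  have hbit : ∀ i, mask.testBit i = decide ((2 : Int) ^ i ∈ nums) := by
    intro i
    rw [hmask, mask_testBit nums 0 i, Nat.zero_testBit, Bool.false_or]
  have hlzb : lzb mask = i0 := by
    have hlz : (2 : Int) ^ (lzb mask) ∉ nums := by
      have := lzb_testBit_self mask
      rw [hbit (lzb mask)] at this
      simpa using this
    have h1 : i0 ≤ lzb mask := Nat.find_le hlz
    have h2 : ¬ (i0 < lzb mask) := by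
      intro hlt
      have := lzb_testBit_lt mask i0 hlt
      rw [hbit i0] at this
      exact hi0not (by simpa using this)
    omega
  have hB : (mask + 1) - ((mask + 1) &&& (mask + 1 - 1)) = 2 ^ i0 := by
    rw [Nat.add_sub_cancel, lzb_formula mask, hlzb]
  simp only [hA]
  rw [hB]
  push_cast
  ring
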